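-- pv_equiv track=rewrite | github.com/rdmm404/hiremepls | backend/packages/tasks/tasks/core/fetcher.py | _requires_javascript
-- ===== SOURCE A (Python) =====
-- def _requires_javascript(html: str) -> bool:
--     js_indicators = [
--         "window.onload",
--         "document.addEventListener",
--         "DOMContentLoaded",
--         "noscript",
--         "enable JavaScript",
--         "JavaScript is required",
--     ]
--
--     for indicator in js_indicators:
--         if indicator in html:
--             return True
--
--     return False
-- ===== SOURCE B (Python) =====
-- import re
--
-- _JS_PATTERN = re.compile(
--     "|".join(
--         map(
--             re.escape,
--             [
--                 "window.onload",
--                 "document.addEventListener",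
--                 "DOMContentLoaded",
--                 "noscript",
--                 "enable JavaScript",
--                 "JavaScript is required",
--             ],
--         )
--     )
-- )
--
--
-- def _requires_javascript(html: str) -> bool:
--     return _JS_PATTERN.search(html) is not None
-- ===== Notes on version B (the rewrite author's own statement) =====
-- stated objective: idiomatic
-- what changed: Replaces six sequential per-indicator substring scans of the HTML with one precompiled regex alternation of the escaped indicators and a single search pass.
import Mathlib
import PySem

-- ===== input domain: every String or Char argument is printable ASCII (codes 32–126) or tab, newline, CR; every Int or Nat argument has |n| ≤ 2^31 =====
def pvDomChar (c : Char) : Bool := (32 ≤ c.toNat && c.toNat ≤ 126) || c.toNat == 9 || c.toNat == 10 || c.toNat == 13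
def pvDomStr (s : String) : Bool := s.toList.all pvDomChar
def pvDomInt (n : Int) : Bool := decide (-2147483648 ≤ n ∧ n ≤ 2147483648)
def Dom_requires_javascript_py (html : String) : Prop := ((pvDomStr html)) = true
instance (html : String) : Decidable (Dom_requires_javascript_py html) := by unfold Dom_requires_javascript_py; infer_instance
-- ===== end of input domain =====

-- B replaces six sequential 'indicator in html' scans by one precompiled regex alternation of the escaped indicators and a single search; its port transcribes regex search for a literal alternation: a left-to-right scan trying each alternative at every position.


def jsIndicators : List String :=
  ["window.onload", "document.addEventListener", "DOMContentLoaded",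
   "noscript", "enable JavaScript", "JavaScript is required"]

-- ===== PORT A =====
-- A's loop with early return: try each indicator in order with 'indicator in html'
def reqJsLoopA (html : String) : List String → Bool
  | [] => false
  | ind :: rest => if PySem.Str.isIn ind html then true else reqJsLoopA html rest

def requires_javascript_py (html : String) : Bool :=
  reqJsLoopA html jsIndicators

-- ===== PORT B =====
-- Source B calls re.search on the alternation of the re.escape'd indicators; re.escape makes
-- each branch match exactly its literal text, and re.search on an alternation scans the
-- string left to right, at each position trying the alternatives in order, returning a
-- match (≠ None) iff some alternative matches at some position. reqJsSearchB is exactly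
-- that scan, on the suffixes of the char list (positions 0 .. len).
def reqJsSearchB (alts : List (List Char)) : List Char → Bool
  | [] => alts.any (fun a => a.isPrefixOf [])
  | c :: rest =>
      (alts.any (fun a => a.isPrefixOf (c :: rest))) || reqJsSearchB alts rest

def requires_javascript_py_alt (html : String) : Bool :=
  reqJsSearchB (jsIndicators.map String.toList) html.toList

-- ===== PRECONDITION & SPEC =====
def Spec_requires_javascript_py (html : String) (out : Bool) : Prop := out = requires_javascript_py_alt html
instance (html : String) (out : Bool) : Decidable (Spec_requires_javascript_py html out) := by unfold Spec_requires_javascript_py; infer_instance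

-- ===== CLAIM (what is proved, stated in full; the proofs are below) =====
def Claim_equal_requires_javascript_py : Prop := ∀ (html : String), Dom_requires_javascript_py html → Spec_requires_javascript_py html (requires_javascript_py html)

-- ===== LEMMAS AND PROOFS =====

theorem reqJsSearchB_iff (alts : List (List Char)) (s : List Char) :
    reqJsSearchB alts s = true ↔ ∃ a ∈ alts, a <:+: s := by
  induction s with
  | nil => simp [reqJsSearchB, List.any_eq_true, List.prefix_iff_eq_take]
  | cons c rest ih =>
      simp [reqJsSearchB, List.any_eq_true, ih, List.infix_cons_iff]
      constructor
      · rintro (⟨i, hi, hp⟩ | ⟨i, hi, hinf⟩)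
        · exact ⟨i, hi, Or.inl hp⟩
        · exact ⟨i, hi, Or.inr hinf⟩
      · rintro ⟨i, hi, hp | hinf⟩
        · exact Or.inl ⟨i, hi, hp⟩
        · exact Or.inr ⟨i, hi, hinf⟩

theorem reqJsLoopA_iff (html : String) (inds : List String) :
    reqJsLoopA html inds = true ↔ ∃ ind ∈ inds, ind.toList <:+: html.toList := by
  induction inds with
  | nil => simp [reqJsLoopA]
  | cons i rest ih =>
      simp only [reqJsLoopA]
      by_cases h : PySem.Str.isIn i html = true
      · rw [if_pos h]
        simp only [List.mem_cons, exists_eq_or_imp]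
        exact iff_of_true trivial (Or.inl (((PySem.Str.isIn_iff_infix _ _).mp h)))
      · rw [if_neg h]
        rw [PySem.Str.isIn_iff_infix _ _] at h
        simp [ih, h]

-- ===== VERDICT (by name: the statement is the Claim_ definition above) =====
theorem requires_javascript_py_spec : Claim_equal_requires_javascript_py := by
  intro html _
  show requires_javascript_py html = requires_javascript_py_alt html
  rw [Bool.eq_iff_iff]
  rw [requires_javascript_py, requires_javascript_py_alt, reqJsLoopA_iff, reqJsSearchB_iff]
  simp
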